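-- pv_equiv track=rewrite | github.com/qienhuang/F-I-T | experiments/grokking_transition_audit_v0_1/src/run_pipeline.py | event_order_signature
-- ===== SOURCE A (Python) =====
-- from bisect import bisect_left
--
-- def nearest_event_within(sorted_steps, t, radius):
--     if not sorted_steps:
--         return None
--     idx = bisect_left(sorted_steps, t)
--     candidates = []
--     if idx < len(sorted_steps):
--         candidates.append(sorted_steps[idx])
--     if idx > 0:
--         candidates.append(sorted_steps[idx - 1])
--     best = None
--     best_dist = None
--     for c in candidates:
--         d = abs(c - t)
--         if d <= radius and (best_dist is None or d < best_dist):
--             best = c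
--             best_dist = d
--     return best
--
-- def event_order_signature(t, force_events, info_events, constraint_events, radius):
--     positions = {
--         "S1": nearest_event_within(force_events, t, radius),
--         "S2": nearest_event_within(info_events, t, radius),
--         "S3": nearest_event_within(constraint_events, t, radius),
--     }
--     if any(v is None for v in positions.values()):
--         return None
--     return tuple(k for k, _ in sorted(positions.items(), key=lambda kv: (kv[1], kv[0])))
-- ===== SOURCE B (Python) =====
-- def _bisect(steps, t, lo, hi):
--     if lo >= hi:
--         return lo
--     mid = (lo + hi) // 2
--     if steps[mid] < t:
--         return _bisect(steps, t, mid + 1, hi)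
--     return _bisect(steps, t, lo, mid)
--
-- def nearest_event_within(sorted_steps, t, radius):
--     if not sorted_steps:
--         return None
--     idx = _bisect(sorted_steps, t, 0, len(sorted_steps))
--     neighbors = sorted_steps[max(idx - 1, 0):idx + 1]
--     in_radius = [c for c in neighbors if abs(c - t) <= radius]
--     if not in_radius:
--         return None
--     return min(in_radius, key=lambda c: (abs(c - t), -c))
--
-- def event_order_signature(t, force_events, info_events, constraint_events, radius):
--     labelled = []
--     for label, events in (("S1", force_events), ("S2", info_events), ("S3", constraint_events)):
--         p = nearest_event_within(events, t, radius)
--         if p is None: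
--             return None
--         labelled.append((p, label))
--     labelled.sort()
--     return tuple(label for _, label in labelled)
-- ===== Notes on version B (the rewrite author's own statement) =====
-- stated objective: alternative
-- what changed: nearest_event_within replaces the bisect_left library call plus two conditional candidate appends and a manual best/best_dist loop by a recursive binary search, a single two-element slice steps[max(idx-1,0):idx+1], and filter-within-radius then min with key (abs(c-t), -c); the outer function replaces the dict + any(None) + sorted(items) pipeline by one early-returning loop that collects (position, label) pairs and sorts them.
import Mathlib
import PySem

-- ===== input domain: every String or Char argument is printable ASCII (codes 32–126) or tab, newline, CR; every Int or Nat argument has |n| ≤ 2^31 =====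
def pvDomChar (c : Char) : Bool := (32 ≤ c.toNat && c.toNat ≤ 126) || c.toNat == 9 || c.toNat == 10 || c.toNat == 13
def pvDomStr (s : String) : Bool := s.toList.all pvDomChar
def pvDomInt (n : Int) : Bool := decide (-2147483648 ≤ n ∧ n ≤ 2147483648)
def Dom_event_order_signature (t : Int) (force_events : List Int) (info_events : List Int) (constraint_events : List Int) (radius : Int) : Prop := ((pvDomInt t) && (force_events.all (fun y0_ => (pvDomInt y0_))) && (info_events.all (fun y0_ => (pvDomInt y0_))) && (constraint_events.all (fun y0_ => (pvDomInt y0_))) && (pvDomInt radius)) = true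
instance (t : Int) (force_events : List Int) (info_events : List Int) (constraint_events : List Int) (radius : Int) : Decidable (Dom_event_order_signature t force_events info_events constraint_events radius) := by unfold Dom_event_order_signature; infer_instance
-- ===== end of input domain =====

-- B replaces bisect_left + two conditional candidate appends + a best/best_dist loop by a
-- recursive binary search, one two-element slice, and filter-then-min with key (abs(c-t), -c);
-- the outer dict/any/sorted pipeline becomes one early-returning loop over labelled pairs.

-- ===== PORT A =====
-- nearest_event_within: bisect_left, up to two neighbouring candidates, manual best/best_dist loop.
-- getD's default 0 is never consulted: each index is in range exactly when its guard holds.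
def nearestA (sorted_steps : List Int) (t : Int) (radius : Int) : Option Int :=
  if sorted_steps = [] then none
  else
    let idx := PySem.List.bisectLeft sorted_steps t
    let candidates : List Int :=
      (if idx < sorted_steps.length then [sorted_steps.getD idx 0] else []) ++
      (if 0 < idx then [sorted_steps.getD (idx - 1) 0] else [])
    let res := candidates.foldl
      (fun b c =>
        let d := |c - t|
        match b.2 with
        | none => if d ≤ radius then (some c, some d) else b
        | some bd => if d ≤ radius ∧ d < bd then (some c, some d) else b)
      ((none : Option Int), (none : Option Int))
    res.1

def event_order_signature (t : Int) (force_events : List Int) (info_events : List Int) (constraint_events : List Int) (radius : Int) : Option (List String) :=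
  let s1 := nearestA force_events t radius
  let s2 := nearestA info_events t radius
  let s3 := nearestA constraint_events t radius
  match s1, s2, s3 with
  | some p1, some p2, some p3 =>
      some ((PySem.List.sorted2 [("S1", p1), ("S2", p2), ("S3", p3)]
        (fun kv => kv.2) (fun kv => kv.1) false).map (fun kv => kv.1))
  | _, _, _ => none

-- ===== PORT B =====
-- _bisect of Source B: recursive binary search; steps[mid] is in range whenever lo < hi ≤ len,
-- so getD's default 0 is never consulted on the calls nearestB makes.
def bisectRec (steps : List Int) (t : Int) (lo hi : Nat) : Nat :=
  if h : lo < hi then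
    if steps.getD ((lo + hi) / 2) 0 < t then bisectRec steps t ((lo + hi) / 2 + 1) hi
    else bisectRec steps t lo ((lo + hi) / 2)
  else lo
termination_by hi - lo
decreasing_by all_goals omega

-- nearest_event_within of Source B: slice the two neighbours, filter within radius, min by key
def nearestB (sorted_steps : List Int) (t : Int) (radius : Int) : Option Int :=
  if sorted_steps = [] then none
  else
    let idx := bisectRec sorted_steps t 0 sorted_steps.length
    let neighbors := PySem.List.slice sorted_steps (some (max ((idx : Int) - 1) 0)) (some ((idx : Int) + 1))
    let in_radius := neighbors.filter (fun c => |c - t| ≤ radius)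
    if in_radius = [] then none
    else PySem.List.min2? in_radius (fun c => |c - t|) (fun c => -c)

-- the for-loop of Source B's event_order_signature: walk the labelled (label, events) pairs,
-- early None on a missing event, otherwise collect the (position, label) pairs in order
def collectB (t : Int) (radius : Int) : List (String × List Int) → Option (List (Int × String))
  | [] => some []
  | (label, events) :: rest =>
      (nearestB events t radius).bind (fun p =>
        (collectB t radius rest).map (fun labelled => (p, label) :: labelled))

def event_order_signature_alt (t : Int) (force_events : List Int) (info_events : List Int) (constraint_events : List Int) (radius : Int) : Option (List String) :=
  (collectB t radius [("S1", force_events), ("S2", info_events), ("S3", constraint_events)]).map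
    (fun labelled => (PySem.List.sorted2 labelled (fun x => x.1) (fun x => x.2) false).map (fun x => x.2))

-- ===== PRECONDITION & SPEC =====
def Spec_event_order_signature (t : Int) (force_events : List Int) (info_events : List Int) (constraint_events : List Int) (radius : Int) (out : Option (List String)) : Prop := out = event_order_signature_alt t force_events info_events constraint_events radius
instance (t : Int) (force_events : List Int) (info_events : List Int) (constraint_events : List Int) (radius : Int) (out : Option (List String)) : Decidable (Spec_event_order_signature t force_events info_events constraint_events radius out) := by unfold Spec_event_order_signature; infer_instance

-- ===== CLAIM (what is proved, stated in full; the proofs are below) =====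
def Claim_equal_event_order_signature : Prop := ∀ (t : Int) (force_events : List Int) (info_events : List Int) (constraint_events : List Int) (radius : Int), Dom_event_order_signature t force_events info_events constraint_events radius → Spec_event_order_signature t force_events info_events constraint_events radius (event_order_signature t force_events info_events constraint_events radius)

-- ===== LEMMAS AND PROOFS =====

-- B's recursive binary search computes exactly what Python's bisect_left loop computes
theorem bisect_loop_eq (xs : List Int) (t : Int) :
    ∀ (fuel lo hi : Nat), hi ≤ xs.length → hi - lo ≤ fuel →
      PySem.List.bisectLeftLoop xs t fuel lo hi = bisectRec xs t lo hi := by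
  intro fuel
  induction fuel with
  | zero =>
    intro lo hi hn h0
    rw [bisectRec]
    have : ¬ lo < hi := by omega
    simp [PySem.List.bisectLeftLoop, this]
  | succ fuel ih =>
    intro lo hi hn hf
    rw [bisectRec]
    by_cases h : lo < hi
    · have hmid : (lo + hi) / 2 < xs.length := by omega
      have hsome : xs[(lo + hi) / 2]? = some (xs[(lo + hi) / 2]'hmid) :=
        List.getElem?_eq_getElem hmid
      have hgd : xs.getD ((lo + hi) / 2) 0 = xs[(lo + hi) / 2]'hmid :=
        List.getD_eq_getElem _ _ hmid
      simp only [PySem.List.bisectLeftLoop, h, if_true, hsome, hgd, dif_pos, reduceIte]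
      by_cases hcmp : xs[(lo + hi) / 2]'hmid < t
      · simp only [hcmp, if_true, reduceIte]
        exact ih ((lo + hi) / 2 + 1) hi hn (by omega)
      · simp only [hcmp, if_false, reduceIte]
        exact ih lo ((lo + hi) / 2) (by omega) (by omega)
    · simp [PySem.List.bisectLeftLoop, h]

-- the binary-search invariant, for an ARBITRARY list: the final index idx satisfies
-- idx ≤ hi, t ≤ steps[idx] when idx is in range, and steps[idx-1] < t when idx > 0
theorem bisectRec_spec (xs : List Int) (t : Int) :
    ∀ (d lo hi : Nat), hi - lo ≤ d → lo ≤ hi → hi ≤ xs.length →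
      (hi < xs.length → t ≤ xs.getD hi 0) → (0 < lo → xs.getD (lo - 1) 0 < t) →
      lo ≤ bisectRec xs t lo hi ∧ bisectRec xs t lo hi ≤ hi ∧
      (bisectRec xs t lo hi < xs.length → t ≤ xs.getD (bisectRec xs t lo hi) 0) ∧
      (0 < bisectRec xs t lo hi → xs.getD (bisectRec xs t lo hi - 1) 0 < t) := by
  intro d
  induction d with
  | zero =>
    intro lo hi h1 h2 h3 h4 h5
    have heq : lo = hi := by omega
    rw [bisectRec]
    have : ¬ lo < hi := by omega
    rw [dif_neg this]
    subst heq
    exact ⟨le_refl _, le_refl _, h4, h5⟩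
  | succ d ih =>
    intro lo hi h1 h2 h3 h4 h5
    rw [bisectRec]
    by_cases h : lo < hi
    · rw [dif_pos h]
      by_cases hcmp : xs.getD ((lo + hi) / 2) 0 < t
      · rw [if_pos hcmp]
        have hres := ih ((lo + hi) / 2 + 1) hi (by omega) (by omega) h3 h4
          (by intro _; simpa using hcmp)
        exact ⟨by omega, hres.2.1, hres.2.2.1, hres.2.2.2⟩
      · rw [if_neg hcmp]
        have hres := ih lo ((lo + hi) / 2) (by omega) (by omega) (by omega)
          (by intro _; omega) h5
        exact ⟨hres.1, by omega, hres.2.2.1, hres.2.2.2⟩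
    · rw [dif_neg h]
      have heq : lo = hi := by omega
      subst heq
      exact ⟨le_refl _, le_refl _, h4, h5⟩

-- the slice steps[max(idx-1,0):idx+1] is exactly the ≤ 2 neighbouring elements, left then right
theorem neighbors_eq (xs : List Int) (idx : Nat) (hx : xs ≠ []) (hle : idx ≤ xs.length) :
    (xs.drop (idx - 1)).take (idx + 1 - (idx - 1)) =
      (if 0 < idx then [xs.getD (idx - 1) 0] else []) ++
      (if idx < xs.length then [xs.getD idx 0] else []) := by
  by_cases h2 : 0 < idx
  · have him : idx - 1 < xs.length := by omega
    have e1 : idx + 1 - (idx - 1) = 2 := by omega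
    have e2 : idx - 1 + 1 = idx := by omega
    by_cases h1 : idx < xs.length
    · rw [List.drop_eq_getElem_cons him, e1, e2, List.drop_eq_getElem_cons h1,
        if_pos h2, if_pos h1, List.getD_eq_getElem _ _ him, List.getD_eq_getElem _ _ h1]
      rfl
    · have hd : xs.drop idx = [] := List.drop_eq_nil_of_le (by omega)
      rw [List.drop_eq_getElem_cons him, e1, e2, hd,
        if_pos h2, if_neg h1, List.getD_eq_getElem _ _ him]
      rfl
  · have h0 : idx = 0 := by omega
    subst h0
    obtain ⟨x, xs', rfl⟩ := List.exists_cons_of_ne_nil hx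
    simp

theorem nearest_eq (xs : List Int) (t radius : Int) :
    nearestA xs t radius = nearestB xs t radius := by
  unfold nearestA nearestB
  by_cases hx : xs = []
  · simp [hx]
  · rw [if_neg hx, if_neg hx]
    dsimp only
    have hbis : PySem.List.bisectLeft xs t = bisectRec xs t 0 xs.length := by
      unfold PySem.List.bisectLeft
      exact bisect_loop_eq xs t xs.length 0 xs.length le_rfl (by omega)
    rw [hbis]
    obtain ⟨-, hle, hge, hlt⟩ := bisectRec_spec xs t xs.length 0 xs.length (by omega)
      (by omega) le_rfl (fun h => absurd h (lt_irrefl _)) (fun h => absurd h (by omega))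
    set idx := bisectRec xs t 0 xs.length with hidx
    have hcast1 : (max ((idx : Int) - 1) 0) = (((idx - 1 : Nat)) : Int) := by omega
    have hcast2 : ((idx : Int) + 1) = (((idx + 1 : Nat)) : Int) := by omega
    rw [hcast1, hcast2, PySem.List.slice_natCast, neighbors_eq xs idx hx hle]
    by_cases h1 : idx < xs.length <;> by_cases h2 : 0 < idx
    · -- both neighbours exist
      have hc0t : t ≤ xs.getD idx 0 := hge h1
      have hc1t : xs.getD (idx-1) 0 < t := hlt h2
      by_cases hr0 : |xs.getD idx 0 - t| ≤ radius <;> by_cases hr1 : |xs.getD (idx-1) 0 - t| ≤ radius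
      · by_cases hdd : |xs.getD (idx-1) 0 - t| < |xs.getD idx 0 - t| <;>
          · simp only [h1, h2, if_true, if_false, ite_true, ite_false, List.cons_append,
              List.nil_append, List.foldl_cons, List.foldl_nil, List.filter_cons, List.filter_nil,
              decide_eq_true_eq, hr0, hr1, hdd, and_self, and_true, true_and, and_false, false_and,
              PySem.List.min2?, reduceCtorEq, reduceIte]
            split_ifs with hb <;>
            first
            | rfl
            | (exfalso
               simp at hb
               all_goals try simp only [← List.getD_eq_getElem?_getD] at hb
               all_goals
                 rcases abs_cases (xs.getD idx 0 - t) with ⟨e0, _⟩ | ⟨e0, _⟩ <;>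
                   rcases abs_cases (xs.getD (idx-1) 0 - t) with ⟨e1, _⟩ | ⟨e1, _⟩ <;> omega)
      · simp only [h1, h2, if_true, if_false, ite_true, ite_false, List.cons_append,
          List.nil_append, List.foldl_cons, List.foldl_nil, List.filter_cons, List.filter_nil,
          decide_eq_true_eq, hr0, hr1, and_true, true_and, and_false, false_and,
          PySem.List.min2?, reduceCtorEq, reduceIte]
      · simp only [h1, h2, if_true, if_false, ite_true, ite_false, List.cons_append,
          List.nil_append, List.foldl_cons, List.foldl_nil, List.filter_cons, List.filter_nil,
          decide_eq_true_eq, hr0, hr1, and_true, true_and, and_false, false_and,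
          PySem.List.min2?, reduceCtorEq, reduceIte]
      · simp only [h1, h2, if_true, if_false, ite_true, ite_false, List.cons_append,
          List.nil_append, List.foldl_cons, List.foldl_nil, List.filter_cons, List.filter_nil,
          decide_eq_true_eq, hr0, hr1, and_true, true_and, and_false, false_and,
          PySem.List.min2?, reduceCtorEq, reduceIte]
    · -- only the neighbour at idx
      by_cases hr0 : |xs.getD idx 0 - t| ≤ radius <;>
        simp only [h1, h2, if_true, if_false, ite_true, ite_false, List.cons_append,
          List.nil_append, List.append_nil, List.foldl_cons, List.foldl_nil, List.filter_cons,
          List.filter_nil, decide_eq_true_eq, hr0, and_true, true_and,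
          PySem.List.min2?, reduceCtorEq, reduceIte]
    · -- only the neighbour at idx - 1
      by_cases hr1 : |xs.getD (idx-1) 0 - t| ≤ radius <;>
        simp only [h1, h2, if_true, if_false, ite_true, ite_false, List.cons_append,
          List.nil_append, List.append_nil, List.foldl_cons, List.foldl_nil, List.filter_cons,
          List.filter_nil, decide_eq_true_eq, hr1, and_true, true_and,
          PySem.List.min2?, reduceCtorEq, reduceIte]
    · exact absurd (List.eq_nil_of_length_eq_zero (by omega)) hx

theorem cl12 : (['1'] : List Char) < ['2'] := by decide
theorem cl13 : (['1'] : List Char) < ['3'] := by decide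
theorem cl23 : (['2'] : List Char) < ['3'] := by decide
theorem cl21 : ¬ (['2'] : List Char) < ['1'] := by decide
theorem cl31 : ¬ (['3'] : List Char) < ['1'] := by decide
theorem cl32 : ¬ (['3'] : List Char) < ['2'] := by decide

theorem sig_eq (p1 p2 p3 : Int) :
    (PySem.List.sorted2 [("S1", p1), ("S2", p2), ("S3", p3)]
        (fun kv => kv.2) (fun kv => kv.1) false).map (fun kv => kv.1)
    = (PySem.List.sorted2 [(p1, "S1"), (p2, "S2"), (p3, "S3")]
        (fun x => x.1) (fun x => x.2) false).map (fun x => x.2) := by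
  simp only [PySem.List.sorted2, List.foldl]
  repeat' (first | rfl | omega | (split_ifs <;> simp_all [PySem.List.insertBy, cl12, cl13, cl23, cl21, cl31, cl32]))

-- ===== VERDICT (by name: the statement is the Claim_ definition above) =====
theorem event_order_signature_spec : Claim_equal_event_order_signature := by
  intro t f i c r _
  unfold Spec_event_order_signature event_order_signature event_order_signature_alt
  rw [nearest_eq f t r, nearest_eq i t r, nearest_eq c t r]
  simp only [collectB]
  cases nearestB f t r <;> cases nearestB i t r <;> cases nearestB c t r <;>
    simp [sig_eq]
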